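/- GENERATED by c/gen_decode.py: decode facts of the image, one per distinct instruction byte string. -/
import UserX.DecodeImage

#decode_all ProgX.Base.Dec
  "0fb6c0"  -- movzx eax,al
  "48034810"  -- add rcx,QWORD PTR [rax+0x10]
  "4883ee08"  -- sub rsi,0x8
  "4889ee"  -- mov rsi,rbp
  "48b8ffffffffffff0f00"  -- movabs rax,0xfffffffffffff
  "4989ec"  -- mov r12,rbp
  "4c89ee"  -- mov rsi,r13
  "660f2fc4"  -- comisd xmm0,xmm4
  "7338"  -- jae 100dc0
  "760e"  -- jbe 1029c5
  "80bf0000c00000"  -- cmp BYTE PTR [rdi+0xc00000],0x0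
  "b9caffffff"  -- mov ecx,0xffffffca
  "e823d1ffff"  -- call 100cc0
  "e8aefaffff"  -- call 102200
  "eb04"  -- jmp 100225
  "f20f100424"  -- movsd xmm0,QWORD PTR [rsp]
  "f20f5805b3d70300"  -- addsd xmm0,QWORD PTR [rip+0x3d7b3]
  "f20f59d1"  -- mulsd xmm2,xmm1
  "f20f5e1da0e10300"  -- divsd xmm3,QWORD PTR [rip+0x3e1a0]
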